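-- pv_equiv track=rewrite | github.com/basupatil1213/dsa-python | code/stacks/code.py | arrange_guest_arrival_order
-- ===== SOURCE A (Python) =====
-- def arrange_guest_arrival_order(arrival_pattern):
--     stack = []
--     result = []
--
--     for i in range(len(arrival_pattern) + 1):
--         stack.append(str(i + 1))
--
--         if i == len(arrival_pattern) or arrival_pattern[i] == 'I':
--             while stack:
--                 result.append(stack.pop())
--
--     return ''.join(result)
-- ===== SOURCE B (Python) =====
-- def arrange_guest_arrival_order(arrival_pattern):
--     # Single pass: count the length of the current run of non-'I' characters and
--     # emit each finished run as a descending arithmetic range; no stack.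
--     pieces = []
--     start = 1   # first number of the current run
--     run = 0     # length of the current run of non-'I' characters
--     for ch in arrival_pattern:
--         if ch == 'I':
--             pieces.extend(str(x) for x in range(start + run, start - 1, -1))
--             start += run + 1
--             run = 0
--         else:
--             run += 1
--     pieces.extend(str(x) for x in range(start + run, start - 1, -1))
--     return ''.join(pieces)
-- ===== Notes on version B (the rewrite author's own statement) =====
-- stated objective: alternative
-- what changed: Replaces the push/pop stack with a single pass that counts the length of each run of non-'I' characters and emits the finished run as a descending arithmetic range (range(start+run, start-1, -1)); no stack or per-element pop is performed.
import Mathlib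
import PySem

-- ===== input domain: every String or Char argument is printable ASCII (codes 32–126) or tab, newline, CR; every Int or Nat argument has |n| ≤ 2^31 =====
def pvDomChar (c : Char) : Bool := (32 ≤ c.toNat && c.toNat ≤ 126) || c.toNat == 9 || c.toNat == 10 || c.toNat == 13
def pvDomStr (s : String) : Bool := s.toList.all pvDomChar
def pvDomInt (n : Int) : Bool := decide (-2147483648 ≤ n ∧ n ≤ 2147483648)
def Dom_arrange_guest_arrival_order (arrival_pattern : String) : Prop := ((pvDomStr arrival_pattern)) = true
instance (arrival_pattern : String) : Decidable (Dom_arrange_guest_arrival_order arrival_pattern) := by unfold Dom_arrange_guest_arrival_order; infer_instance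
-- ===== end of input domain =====

-- B replaces A's push/pop stack with one pass counting run lengths and emitting
-- each finished run as a descending arithmetic range; same output, same cost.


-- ===== PORT A =====
-- literal port of A: for i in range(len+1): push str(i+1); flush (pop-all) when i==len or s[i]=='I'
def arrange_guest_arrival_order (arrival_pattern : String) : String :=
  let n : Int := PySem.Str.len arrival_pattern
  let st := (PySem.List.pyRange 0 (n + 1) 1).foldl
    (fun (acc : List String × List String) i =>
      let stack := acc.1 ++ [PySem.Int.toStr (i + 1)]
      if i = n ∨ PySem.Str.pyGet? arrival_pattern i = some 'I' then
        ([], acc.2 ++ stack.reverse)   -- 'while stack: result.append(stack.pop())'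
      else (stack, acc.2))
    ([], [])
  PySem.Str.join "" st.2

-- ===== PORT B =====
-- literal port of B (Source B): fold over the characters with state (pieces, start, run)
def arrange_guest_arrival_order_alt (arrival_pattern : String) : String :=
  let st := arrival_pattern.toList.foldl
    (fun (acc : List String × Int × Int) ch =>
      if ch = 'I' then
        (acc.1 ++ (PySem.List.pyRange (acc.2.1 + acc.2.2) (acc.2.1 - 1) (-1)).map PySem.Int.toStr,
         acc.2.1 + acc.2.2 + 1, 0)
      else (acc.1, acc.2.1, acc.2.2 + 1))
    ([], 1, 0)
  PySem.Str.join ""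
    (st.1 ++ (PySem.List.pyRange (st.2.1 + st.2.2) (st.2.1 - 1) (-1)).map PySem.Int.toStr)

-- ===== PRECONDITION & SPEC =====
def Spec_arrange_guest_arrival_order (arrival_pattern : String) (out : String) : Prop := out = arrange_guest_arrival_order_alt arrival_pattern
instance (arrival_pattern : String) (out : String) : Decidable (Spec_arrange_guest_arrival_order arrival_pattern out) := by unfold Spec_arrange_guest_arrival_order; infer_instance

-- ===== CLAIM (what is proved, stated in full; the proofs are below) =====
def Claim_equal_arrange_guest_arrival_order : Prop := ∀ (arrival_pattern : String), Dom_arrange_guest_arrival_order arrival_pattern → Spec_arrange_guest_arrival_order arrival_pattern (arrange_guest_arrival_order arrival_pattern)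

-- ===== LEMMAS AND PROOFS =====

-- reference: A's loop at the level of numbers; the stack `st` is top-first
def pvGold : List Char → Int → List Int → List Int
  | [], k, st => k :: st
  | c :: cs, k, st =>
      if c = 'I' then (k :: st) ++ pvGold cs (k + 1) [] else pvGold cs (k + 1) (k :: st)

theorem pvLemA (s : String) (cs : List Char) (a : Nat) (st : List Int) (res : List String)
    (hdrop : s.toList.drop a = cs) (hlen : a + cs.length = s.toList.length) :
    (PySem.List.pyRange (a : Int) ((s.toList.length : Int) + 1) 1).foldl
      (fun (acc : List String × List String) i =>
        let stack := acc.1 ++ [PySem.Int.toStr (i + 1)]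
        if i = (s.toList.length : Int) ∨ PySem.Str.pyGet? s i = some 'I' then
          ([], acc.2 ++ stack.reverse)
        else (stack, acc.2))
      ((st.map PySem.Int.toStr).reverse, res)
    = ([], res ++ (pvGold cs ((a : Int) + 1) st).map PySem.Int.toStr) := by
  induction cs generalizing a st res with
  | nil =>
    have ha : a = s.toList.length := by
      simp only [List.length_nil, Nat.add_zero] at hlen; exact hlen
    subst ha
    rw [PySem.List.pyRange_one_cons (by omega), PySem.List.pyRange_one_eq_nil (by omega)]
    rw [List.foldl_cons, List.foldl_nil]
    simp [pvGold]
  | cons c cs ih =>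
    have hlt : a < s.toList.length := by
      simp only [List.length_cons] at hlen; omega
    have hget : PySem.Str.pyGet? s (a : Int) = some c := by
      rw [PySem.Str.pyGet?_natCast]
      have h1 : s.toList[a]? = (s.toList.drop a).head? := by rw [List.head?_drop]
      rw [h1, hdrop]; rfl
    have hne : ((a : Int)) ≠ ((s.toList.length : Int)) := by exact_mod_cast Nat.ne_of_lt hlt
    have hdrop' : s.toList.drop (a + 1) = cs := by
      have h2 := congrArg List.tail hdrop
      simpa [List.tail_drop] using h2
    have hlen' : (a + 1) + cs.length = s.toList.length := by
      simp only [List.length_cons] at hlen; omega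
    rw [PySem.List.pyRange_one_cons (by omega : (a : Int) < (s.toList.length : Int) + 1)]
    rw [List.foldl_cons]
    dsimp only
    by_cases hc : c = 'I'
    · subst hc
      rw [if_pos (Or.inr hget)]
      have key := ih (a + 1) [] (res ++ PySem.Int.toStr ((a : Int) + 1) :: st.map PySem.Int.toStr) hdrop' hlen'
      push_cast at key
      simp only [List.map_nil, List.reverse_nil] at key
      rw [show (((st.map PySem.Int.toStr).reverse ++ [PySem.Int.toStr ((a : Int) + 1)]).reverse)
            = PySem.Int.toStr ((a : Int) + 1) :: st.map PySem.Int.toStr by simp]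
      rw [key]
      simp [pvGold]
    · have hcond : ¬ ((a : Int) = (s.toList.length : Int) ∨ PySem.Str.pyGet? s (a : Int) = some 'I') := by
        rintro (h | h)
        · exact hne h
        · rw [hget] at h; exact hc (Option.some.inj h)
      rw [if_neg hcond]
      have key := ih (a + 1) (((a : Int) + 1) :: st) res hdrop' hlen'
      push_cast at key
      rw [show ((st.map PySem.Int.toStr).reverse ++ [PySem.Int.toStr ((a : Int) + 1)])
            = ((((a : Int) + 1) :: st).map PySem.Int.toStr).reverse by simp]
      rw [key]
      simp [pvGold, hc]

theorem pvLemB (cs : List Char) (k r : Int) (pieces : List String) (hr : 0 ≤ r) :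
    (let st := cs.foldl
      (fun (acc : List String × Int × Int) ch =>
        if ch = 'I' then
          (acc.1 ++ (PySem.List.pyRange (acc.2.1 + acc.2.2) (acc.2.1 - 1) (-1)).map PySem.Int.toStr,
           acc.2.1 + acc.2.2 + 1, 0)
        else (acc.1, acc.2.1, acc.2.2 + 1))
      (pieces, k, r);
     st.1 ++ (PySem.List.pyRange (st.2.1 + st.2.2) (st.2.1 - 1) (-1)).map PySem.Int.toStr)
    = pieces ++ (pvGold cs (k + r) (PySem.List.pyRange (k + r - 1) (k - 1) (-1))).map PySem.Int.toStr := by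
  induction cs generalizing k r pieces with
  | nil =>
    simp only [List.foldl_nil, pvGold]
    rw [PySem.List.pyRange_neg_one_cons (by omega)]
  | cons c cs ih =>
    by_cases hc : c = 'I'
    · subst hc
      simp only [List.foldl_cons, reduceIte]
      have key := ih (k + r + 1) 0 (pieces ++ (PySem.List.pyRange (k + r) (k - 1) (-1)).map PySem.Int.toStr) (le_refl 0)
      simp only [Int.add_zero] at key
      rw [key]
      rw [PySem.List.pyRange_neg_one_eq_nil (by omega : k + r + 1 - 1 ≤ k + r + 1 - 1)]
      simp only [pvGold, reduceIte]
      rw [PySem.List.pyRange_neg_one_cons (by omega : k - 1 < k + r)]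
      simp
    · simp only [List.foldl_cons, if_neg hc]
      have key := ih k (r + 1) pieces (by omega)
      rw [show k + (r + 1) = k + r + 1 from by ring] at key
      rw [show k + r + 1 - 1 = k + r from by ring] at key
      dsimp only at key ⊢
      rw [key]
      simp only [pvGold, if_neg hc]
      rw [PySem.List.pyRange_neg_one_cons (by omega : k - 1 < k + r)]

-- ===== VERDICT (by name: the statement is the Claim_ definition above) =====
theorem arrange_guest_arrival_order_spec : Claim_equal_arrange_guest_arrival_order := by
  intro s _
  unfold Spec_arrange_guest_arrival_order
  have hA := pvLemA s s.toList 0 [] [] (by simp) (by simp)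
  have hB := pvLemB s.toList 1 0 [] (le_refl 0)
  exact ((congrArg (fun l : List String × List String => PySem.Str.join "" l.2) hA).trans
    (congrArg (PySem.Str.join "") hB).symm)
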